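-- pv_equiv track=rewrite | github.com/miladv33/MyFirstIntelejPython | first/Modules.py | flippingBits
-- ===== SOURCE A (Python) =====
-- def flippingBits(n):
--     n = bin(n)[2:]
--     n = str(n)
--     n = n.replace("1", "2")
--     n = n.replace("0", "1")
--     n = n.replace("2", "0")
--     remain32 = 32 - len(n)
--     while remain32 > 0:
--         n = str(n)
--         n = "".join(f"1{n}")
--         remain32 -= 1
--     n = int(n, 2)
--     return n
-- ===== SOURCE B (Python) =====
-- def flippingBits(n):
--     width = max(32, n.bit_length())
--     return ((1 << width) - 1) - n
-- ===== Notes on version B (the rewrite author's own statement) =====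
-- stated objective: simpler
-- what changed: Replaces the build-a-binary-string / three str.replace passes / while-loop padding / int(,2) re-parse with a closed-form arithmetic complement: the flip of n within width max(32, n.bit_length()) bits is ((1 << width) - 1) - n.
import Mathlib
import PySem

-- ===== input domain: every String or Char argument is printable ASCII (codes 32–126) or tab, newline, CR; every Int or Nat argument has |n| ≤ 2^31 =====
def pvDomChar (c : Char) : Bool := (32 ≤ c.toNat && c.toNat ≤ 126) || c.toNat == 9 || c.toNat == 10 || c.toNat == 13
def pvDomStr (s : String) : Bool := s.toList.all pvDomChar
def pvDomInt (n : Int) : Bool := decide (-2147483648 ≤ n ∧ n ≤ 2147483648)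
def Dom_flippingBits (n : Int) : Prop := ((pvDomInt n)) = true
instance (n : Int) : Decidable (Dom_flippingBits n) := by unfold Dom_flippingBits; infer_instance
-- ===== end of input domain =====

-- B replaces A's binary-string flipping (slice, three str.replace passes, a '1'-padding
-- while-loop, int(_, 2)) with the closed-form complement ((1 << max(32, n.bit_length())) - 1) - n.


-- ===== PORT A =====
-- strings are carried as List Char (the PySem.Chars representation)

-- 'while remain32 > 0: n = "".join(f"1{n}"); remain32 -= 1' — the counter drops by 1 each
-- iteration, so the loop runs exactly remain32.toNat times; fuel = that count
def pvPadA : Nat → List Char → List Char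
  | 0, s => s
  | k+1, s => pvPadA k ('1' :: s)

def pvBinVal (cs : List Char) : Nat := cs.foldl (fun a c => 2*a + (if c = '1' then 1 else 0)) 0

-- hand port of int(s, 2): exact on the strings this program feeds it (nonempty, digits '0'/'1'
-- only — no sign/whitespace/underscore/prefix ever reaches it); none = ValueError, which is
-- what CPython raises on the 'b…' string a negative n produces (excluded by Pre_ below)
def pvParseBin2? (cs : List Char) : Option Int :=
  if cs ≠ [] ∧ cs.all (fun c => c = '0' || c = '1') then some (pvBinVal cs) else none

def flippingBits (n : Int) : Int :=
  let s1 := PySem.Chars.slice (PySem.Int.toBinChars0b n) (some 2) none  -- bin(n)[2:]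
  -- n = str(n) is the identity on a str
  let s2 := PySem.Chars.replace s1 ['1'] ['2']
  let s3 := PySem.Chars.replace s2 ['0'] ['1']
  let s4 := PySem.Chars.replace s3 ['2'] ['0']
  let remain32 : Int := 32 - PySem.Chars.len s4
  let s5 := pvPadA remain32.toNat s4
  match pvParseBin2? s5 with
  | some v => v
  | none => 0  -- unreachable under Pre_flippingBits: int(_, 2) raises ValueError there

-- ===== PORT B =====
def flippingBits_alt (n : Int) : Int :=
  let width : Nat := max 32 (PySem.Int.bitLength n)
  ((1 <<< width : Int) - 1) - n

-- ===== PRECONDITION & SPEC =====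
-- A raises ValueError for every negative n: the 'b' of bin(n) survives the [2:] slice and
-- int(_, 2) rejects it; Pre_ excludes exactly those inputs.
def Pre_flippingBits (n : Int) : Prop := 0 ≤ n
instance (n : Int) : Decidable (Pre_flippingBits n) := by unfold Pre_flippingBits; infer_instance
def pvWitness_flippingBits : Int := 5

def Spec_flippingBits (n : Int) (out : Int) : Prop := out = flippingBits_alt n
instance (n : Int) (out : Int) : Decidable (Spec_flippingBits n out) := by unfold Spec_flippingBits; infer_instance

-- ===== CLAIM (what is proved, stated in full; the proofs are below) =====
def Claim_equal_flippingBits : Prop := ∀ (n : Int), Dom_flippingBits n → Pre_flippingBits n → Spec_flippingBits n (flippingBits n)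

-- ===== LEMMAS AND PROOFS =====

-- binary digits of m, MSB first (what Nat.toDigits 2 computes)
def pvBits (m : Nat) : List Char :=
  if m < 2 then [Nat.digitChar m]
  else pvBits (m/2) ++ [Nat.digitChar (m % 2)]
decreasing_by exact Nat.div_lt_self (by omega) (by omega)

theorem pv_toDigitsCore_eq (f : Nat) : ∀ (m : Nat) (acc : List Char), m < f →
    Nat.toDigitsCore 2 f m acc = pvBits m ++ acc := by
  induction f with
  | zero => intro m acc h; omega
  | succ f ih =>
    intro m acc h
    rw [Nat.toDigitsCore]
    by_cases h2 : m < 2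
    · have h0 : m / 2 = 0 := by omega
      have hmod : m % 2 = m := by omega
      rw [pvBits]
      simp [h0, h2, hmod]
    · have hne : ¬ m / 2 = 0 := by omega
      have hlt : m / 2 < f := by
        have := Nat.div_lt_self (n := m) (k := 2) (by omega) (by omega)
        omega
      simp only [hne, if_false]
      rw [ih (m/2) _ hlt]
      conv_rhs => rw [pvBits]
      simp [h2]

theorem pv_toDigits_eq (m : Nat) : Nat.toDigits 2 m = pvBits m := by
  have := pv_toDigitsCore_eq (m+1) m [] (by omega)
  simpa [Nat.toDigits] using this

theorem pvBits_mem (m : Nat) : ∀ c ∈ pvBits m, c = '0' ∨ c = '1' := by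
  fun_induction pvBits with
  | case1 m h =>
    interval_cases m <;> simp [Nat.digitChar]
  | case2 m h ih =>
    intro c hc
    rcases List.mem_append.mp hc with h1 | h1
    · exact ih c h1
    · have : m % 2 = 0 ∨ m % 2 = 1 := by omega
      rcases this with h2 | h2 <;> simp [h2, Nat.digitChar] at h1 <;> simp [h1]

theorem pvBits_ne_nil (m : Nat) : pvBits m ≠ [] := by
  rw [pvBits]; split <;> simp

theorem pvBits_length (m : Nat) :
    (pvBits m).length = if m = 0 then 1 else PySem.Int.bitLength (m : Int) := by
  fun_induction pvBits with
  | case1 m h =>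
    interval_cases m
    · simp
    · have h1 : PySem.Int.bitLength (((1:Nat) : Int)) = PySem.Int.bitLength ((((1:Nat)/2 : Nat)) : Int) + 1 :=
        PySem.Int.bitLength_natCast (by omega)
      norm_num at h1
      simp [h1]
  | case2 m h ih =>
    have hm0 : ¬ m = 0 := by omega
    have hbl : PySem.Int.bitLength (m : Int) = PySem.Int.bitLength ((m/2 : Nat) : Int) + 1 :=
      PySem.Int.bitLength_natCast (by omega)
    by_cases hq : m / 2 = 0
    · omega
    · simp [hq] at ih
      simp [hm0, hbl, ih]

-- joint: value bound of pvBits m, and the value of its bit-flip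
def pvFlipC (c : Char) : Char := if c = '1' then '0' else '1'

theorem pvBinVal_foldl (cs : List Char) : ∀ (a : Nat),
    cs.foldl (fun a c => 2*a + (if c = '1' then 1 else 0)) a
      = a * 2 ^ cs.length + pvBinVal cs := by
  induction cs with
  | nil => intro a; simp [pvBinVal]
  | cons c t ih =>
    intro a
    have h1 : pvBinVal (c :: t)
        = (2*0 + (if c = '1' then 1 else 0)) * 2 ^ t.length + pvBinVal t := by
      simp only [pvBinVal, List.foldl_cons]
      rw [ih]
      rfl
    simp only [List.foldl_cons, List.length_cons]
    rw [ih, h1]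
    ring

theorem pvBinVal_append (xs : List Char) (c : Char) :
    pvBinVal (xs ++ [c]) = 2 * pvBinVal xs + (if c = '1' then 1 else 0) := by
  simp only [pvBinVal, List.foldl_append, List.foldl_cons, List.foldl_nil]

theorem pvBits_flip_val (m : Nat) :
    m < 2 ^ (pvBits m).length ∧
    pvBinVal ((pvBits m).map pvFlipC) = 2 ^ (pvBits m).length - 1 - m := by
  fun_induction pvBits with
  | case1 m h =>
    interval_cases m <;> decide
  | case2 m h ih =>
    obtain ⟨hb, hv⟩ := ih
    have hd : m % 2 = 0 ∨ m % 2 = 1 := by omega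
    constructor
    · simp only [List.length_append, List.length_singleton, pow_succ]
      omega
    · rw [List.map_append, List.map_cons, List.map_nil, pvBinVal_append, hv]
      simp only [List.length_append, List.length_singleton]
      rcases hd with h2 | h2
      · have hD : (if pvFlipC (m % 2).digitChar = '1' then (1:Nat) else 0) = 1 := by
          rw [h2]; decide
        rw [hD, pow_succ]
        omega
      · have hD : (if pvFlipC (m % 2).digitChar = '1' then (1:Nat) else 0) = 0 := by
          rw [h2]; decide
        rw [hD, pow_succ]
        omega

-- single-character str.replace is a pointwise map
theorem pv_replace_go_single (o n' : Char) : ∀ (fuel : Nat) (l acc : List Char),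
    l.length ≤ fuel →
    PySem.Chars.replace.go [o] [n'] fuel l acc
      = acc.reverse ++ l.map (fun c => if c = o then n' else c) := by
  intro fuel
  induction fuel with
  | zero =>
    intro l acc h
    have : l = [] := by cases l <;> simp_all
    subst this
    simp [PySem.Chars.replace.go]
  | succ f ih =>
    intro l acc h
    cases l with
    | nil => simp [PySem.Chars.replace.go]
    | cons c t =>
      rw [PySem.Chars.replace.go]
      by_cases hco : o = c
      · subst hco
        have hpre : List.isPrefixOf [o] (o :: t) = true := by
          simp [List.isPrefixOf]
        simp only [hpre, if_true, List.length_cons, List.length_nil,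
          List.drop_succ_cons, List.drop_zero, List.reverse_cons, List.reverse_nil,
          List.nil_append, List.singleton_append] at *
        rw [ih t _ (by omega)]
        simp
      · have hpre : List.isPrefixOf [o] (c :: t) = false := by
          simp only [List.isPrefixOf, List.isPrefixOf_nil_left, Bool.and_true,
            Bool.and_eq_false_iff, beq_eq_false_iff_ne, ne_eq]
          first
          | exact Or.inl hco
          | simp [hco]
        simp only [hpre, Bool.false_eq_true, if_false, List.length_cons] at *
        rw [ih t _ (by omega)]
        have hne : ¬ c = o := fun hc => hco hc.symm
        simp [hne]

theorem pv_replace_single (cs : List Char) (o n' : Char) :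
    PySem.Chars.replace cs [o] [n'] = cs.map (fun c => if c = o then n' else c) := by
  rw [PySem.Chars.replace]
  simp only [List.isEmpty_cons, Bool.false_eq_true, if_false]
  rw [pv_replace_go_single o n' cs.length cs [] (le_refl _)]
  simp

theorem pvPadA_eq (k : Nat) : ∀ (s : List Char), pvPadA k s = List.replicate k '1' ++ s := by
  induction k with
  | zero => intro s; simp [pvPadA]
  | succ k ih =>
    intro s
    rw [pvPadA, ih, List.replicate_succ']
    simp

theorem pvBinVal_replicate_ones (k : Nat) : pvBinVal (List.replicate k '1') = 2 ^ k - 1 := by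
  induction k with
  | zero => simp [pvBinVal]
  | succ k ih =>
    rw [List.replicate_succ', pvBinVal_append, ih, pow_succ]
    have : 1 ≤ 2 ^ k := Nat.one_le_two_pow
    simp; omega

theorem pvBinVal_pad (k : Nat) (cs : List Char) :
    pvBinVal (List.replicate k '1' ++ cs)
      = (2 ^ k - 1) * 2 ^ cs.length + pvBinVal cs := by
  simp only [pvBinVal, List.foldl_append]
  rw [pvBinVal_foldl]
  have h1 : List.foldl (fun a c => 2*a + (if c = '1' then 1 else 0)) 0 (List.replicate k '1')
      = pvBinVal (List.replicate k '1') := rfl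
  rw [h1, pvBinVal_replicate_ones]
  rfl

theorem pv_bitLength_le_32 (m : Nat) (hm : m ≤ 2 ^ 31) : PySem.Int.bitLength (m : Int) ≤ 32 := by
  by_contra h
  have h33 : 33 ≤ PySem.Int.bitLength (m : Int) := by omega
  have hm0 : m ≠ 0 := by
    intro h0; rw [h0] at h33; norm_num [PySem.Int.bitLength_zero] at h33
  have hle := PySem.Int.two_pow_bitLength_le (m : Int) (by exact_mod_cast hm0)
  have : (2:Nat) ^ 32 ≤ 2 ^ (PySem.Int.bitLength (m : Int) - 1) :=
    Nat.pow_le_pow_right (by omega) (by omega)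
  have habs : ((m : Int).natAbs) = m := Int.natAbs_natCast m
  rw [habs] at hle
  have : (2:Nat) ^ 32 ≤ m := le_trans this hle
  norm_num at this hm
  omega

-- the flipped digit string of m: nonempty, all '0'/'1'
theorem pv_flipped_props (m : Nat) :
    (pvBits m).map pvFlipC ≠ [] ∧
    ∀ c ∈ (pvBits m).map pvFlipC, c = '0' ∨ c = '1' := by
  constructor
  · simp [pvBits_ne_nil m]
  · intro c hc
    rcases List.mem_map.mp hc with ⟨d, _, rfl⟩
    by_cases hd : d = '1' <;> simp [pvFlipC, hd]

-- ===== VERDICT (by name: the statement is the Claim_ definition above) =====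
theorem flippingBits_spec : Claim_equal_flippingBits := by
  intro n hdom hpre
  unfold Spec_flippingBits flippingBits flippingBits_alt
  -- n = ↑m with m ≤ 2^31
  obtain ⟨m, rfl⟩ : ∃ m : Nat, n = (m : Int) := ⟨n.toNat, (Int.toNat_of_nonneg hpre).symm⟩
  have hm : m ≤ 2 ^ 31 := by
    unfold Dom_flippingBits pvDomInt at hdom
    simp at hdom
    norm_num
    omega
  -- the sliced string is pvBits m
  have hbin : PySem.Int.toBinChars0b (m : Int) = '0' :: 'b' :: pvBits m := by
    rw [PySem.Int.toBinChars0b]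
    have : ¬ ((m : Int) < 0) := by omega
    simp [this, pv_toDigits_eq]
  have hslice : PySem.Chars.slice (PySem.Int.toBinChars0b (m : Int)) (some 2) none = pvBits m := by
    rw [hbin, PySem.Chars.slice_eq_listSlice, PySem.List.slice_from _ (by norm_num : (0:Int) ≤ 2)]
    simp
  -- the three replaces are the pointwise flip
  have hflip : PySem.Chars.replace (PySem.Chars.replace (PySem.Chars.replace (pvBits m)
      ['1'] ['2']) ['0'] ['1']) ['2'] ['0'] = (pvBits m).map pvFlipC := by
    rw [pv_replace_single, pv_replace_single, pv_replace_single]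
    simp only [List.map_map]
    refine List.map_congr_left ?_
    intro c hc
    rcases pvBits_mem m c hc with rfl | rfl <;> simp [pvFlipC]
  simp only [hslice, hflip]
  -- lengths
  set L := (pvBits m).length with hL
  have hlen : ((pvBits m).map pvFlipC).length = L := by simp [hL]
  have hL32 : L ≤ 32 := by
    rw [hL, pvBits_length]
    split
    · omega
    · exact pv_bitLength_le_32 m hm
  have hL1 : 1 ≤ L := by
    rw [hL]
    have := pvBits_ne_nil m
    cases h : pvBits m with
    | nil => exact absurd h this
    | cons a t => simp
  -- padded string and its value
  have hpadlen : (32 - (PySem.Chars.len ((pvBits m).map pvFlipC))).toNat = 32 - L := by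
    rw [PySem.Chars.len, hlen]; omega
  rw [hpadlen, pvPadA_eq]
  obtain ⟨hbound, hval⟩ := pvBits_flip_val m
  rw [← hL] at hbound hval
  have hallbin : (List.replicate (32 - L) '1' ++ (pvBits m).map pvFlipC).all
      (fun c => c = '0' || c = '1') = true := by
    rw [List.all_eq_true]
    intro c hc
    rcases List.mem_append.mp hc with h1 | h1
    · rw [List.eq_of_mem_replicate h1]; simp
    · rcases (pv_flipped_props m).2 c h1 with rfl | rfl <;> simp
  have hne : List.replicate (32 - L) '1' ++ (pvBits m).map pvFlipC ≠ [] := by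
    simp [(pv_flipped_props m).1]
  rw [pvParseBin2?]
  simp only [hne, hallbin, ne_eq, not_false_iff, and_true, if_pos]
  -- value arithmetic
  rw [pvBinVal_pad, hlen, hval]
  have hpow : (2:Nat) ^ (32 - L) * 2 ^ L = 2 ^ 32 := by
    rw [← pow_add]; congr 1; omega
  have hmlt : m < 2 ^ 32 := by
    calc m < 2 ^ L := hbound
    _ ≤ 2 ^ 32 := Nat.pow_le_pow_right (by omega) hL32
  have hLpos : (1:Nat) ≤ 2 ^ L := Nat.one_le_two_pow
  have hveq : (2 ^ (32 - L) - 1) * 2 ^ L + (2 ^ L - 1 - m) = 2 ^ 32 - 1 - m := by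
    have h1 : (2 ^ (32 - L) - 1) * 2 ^ L = 2 ^ (32 - L) * 2 ^ L - 2 ^ L := by
      rw [Nat.sub_mul]; simp
    rw [h1, hpow]
    have : (2:Nat) ^ L ≤ 2 ^ 32 := Nat.pow_le_pow_right (by omega) hL32
    omega
  rw [hveq]
  -- B's side: width = 32
  have hwidth : max 32 (PySem.Int.bitLength ((m : Int))) = 32 := by
    have := pv_bitLength_le_32 m hm
    omega
  rw [hwidth]
  have hsh : ((1:Nat) <<< (32:Nat)) = 4294967296 := by
    rw [Nat.shiftLeft_eq]
  have h32 : (2:Nat) ^ 32 = 4294967296 := by norm_num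
  rw [h32] at hmlt ⊢
  rw [hsh]
  omega
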